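-- pv_equiv track=rewrite | github.com/Mingoomato/ProteinScope | proteinscope/analyzers/isoform_handler.py | _parse_fasta_block
-- ===== SOURCE A (Python) =====
-- from typing import Optional
--
-- def _parse_fasta_block(fasta_text: str) -> dict[str, str]:
--     """Parse a multi-FASTA string into {id: sequence} dict."""
--     seqs: dict[str, str] = {}
--     current_id: Optional[str] = None
--     current_seq: list[str] = []
--
--     for line in fasta_text.splitlines():
--         if line.startswith(">"):
--             if current_id:
--                 seqs[current_id] = "".join(current_seq)
--             # Extract isoform accession from header, e.g. >sp|P68871-2|...
--             header_id = line[1:].split()[0]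
--             current_id = header_id
--             current_seq = []
--         else:
--             current_seq.append(line.strip())
--
--     if current_id:
--         seqs[current_id] = "".join(current_seq)
--
--     return seqs
-- ===== SOURCE B (Python) =====
-- def _parse_fasta_block(fasta_text: str) -> dict[str, str]:
--     """Parse a multi-FASTA string into {id: sequence} dict (block-at-a-time)."""
--     seqs: dict[str, str] = {}
--     lines = fasta_text.splitlines()
--     # skip any lines before the first header
--     while lines and not lines[0].startswith(">"):
--         lines = lines[1:]
--     # consume one record (header + its body block) per outer iteration
--     while lines:
--         header, rest = lines[0], lines[1:]
--         n = 0
--         while n < len(rest) and not rest[n].startswith(">"):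
--             n += 1
--         seqs[header[1:].split()[0]] = "".join(l.strip() for l in rest[:n])
--         lines = rest[n:]
--     return seqs
-- ===== Notes on version B (the rewrite author's own statement) =====
-- stated objective: alternative
-- what changed: Replaces A's single stateful pass (current_id/current_seq accumulators with an end-of-loop flush) by a block-structured scan: skip the preamble, then per record take the header and consume its whole body segment before inserting, with no carried parser state.
import Mathlib
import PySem

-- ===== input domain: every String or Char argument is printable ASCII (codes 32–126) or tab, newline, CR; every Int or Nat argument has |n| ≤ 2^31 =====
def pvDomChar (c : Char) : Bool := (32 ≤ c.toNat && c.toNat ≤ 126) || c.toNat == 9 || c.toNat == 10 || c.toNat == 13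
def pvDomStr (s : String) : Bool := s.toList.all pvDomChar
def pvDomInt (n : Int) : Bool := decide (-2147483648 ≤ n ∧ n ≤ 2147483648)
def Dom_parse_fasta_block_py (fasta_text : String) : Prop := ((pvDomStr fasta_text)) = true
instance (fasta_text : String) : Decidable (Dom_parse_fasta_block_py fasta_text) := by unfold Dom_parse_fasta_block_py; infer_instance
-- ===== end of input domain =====

-- B parses block-at-a-time (skip preamble, then header + whole body segment per step) instead of A's
-- single stateful pass with current_id/current_seq accumulators and an end-of-loop flush; return value only.


-- ===== PORT A =====
-- flush: "if current_id: seqs[current_id] = ''.join(current_seq)"  (Python truthiness: None or "" skip)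
def pvAFlush (seqs : PySem.Dict String String) (cid : Option String) (cseq : List String) :
    PySem.Dict String String :=
  match cid with
  | none => seqs
  | some i => if i = "" then seqs else seqs.insert i (PySem.Str.join "" cseq)

-- one iteration of A's "for line in fasta_text.splitlines()"
-- header_id = line[1:].split()[0] raises IndexError when split() is empty: excluded by Pre_ (headD "" there)
def pvAStep (st : PySem.Dict String String × Option String × List String) (line : String) :
    PySem.Dict String String × Option String × List String :=
  if PySem.Str.startswith line ">" then
    (pvAFlush st.1 st.2.1 st.2.2,
     some ((PySem.Str.split₀ (PySem.Str.slice line (some 1) none)).headD ""),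
     [])
  else
    (st.1, st.2.1, st.2.2 ++ [PySem.Str.strip line])

def parse_fasta_block_py (fasta_text : String) : List (String × String) :=
  let st := (PySem.Str.splitlines fasta_text).foldl pvAStep (PySem.Dict.empty, none, [])
  (pvAFlush st.1 st.2.1 st.2.2).items

-- ===== PORT B =====
-- "not lines[k].startswith('>')"
def pvNotHeader (l : String) : Bool := !PySem.Str.startswith l ">"

-- B's outer "while lines": take the header, scan off its whole body (the inner index loop = take/drop
-- of the non-header span), insert, continue on the remainder
def pvBLoop : List String → PySem.Dict String String → PySem.Dict String String
  | [], seqs => seqs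
  | header :: rest, seqs =>
    pvBLoop (rest.dropWhile pvNotHeader)
      (seqs.insert ((PySem.Str.split₀ (PySem.Str.slice header (some 1) none)).headD "")
        (PySem.Str.join "" ((rest.takeWhile pvNotHeader).map PySem.Str.strip)))
  termination_by lines => lines.length
  decreasing_by
    exact Nat.lt_succ_of_le (List.length_dropWhile_le _ _)

def parse_fasta_block_py_alt (fasta_text : String) : List (String × String) :=
  (pvBLoop ((PySem.Str.splitlines fasta_text).dropWhile pvNotHeader) PySem.Dict.empty).items

-- ===== PRECONDITION & SPEC =====
-- Pre_ excludes exactly the inputs on which A raises IndexError: a header line with no whitespace-token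
-- after '>' (so line[1:].split() is empty and split()[0] raises).
def Pre_parse_fasta_block_py (fasta_text : String) : Prop :=
  ∀ l ∈ PySem.Str.splitlines fasta_text, PySem.Str.startswith l ">" = true →
    (PySem.Str.split₀ (PySem.Str.slice l (some 1) none)).headD "" ≠ ""
instance (fasta_text : String) : Decidable (Pre_parse_fasta_block_py fasta_text) := by
  unfold Pre_parse_fasta_block_py; infer_instance

def pvWitness_parse_fasta_block_py : String := ">sp|P68871-2|x desc\nACGT\nac g\n>b\n\n>c\nTT"

def Spec_parse_fasta_block_py (fasta_text : String) (out : List (String × String)) : Prop :=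
  out = parse_fasta_block_py_alt fasta_text
instance (fasta_text : String) (out : List (String × String)) :
    Decidable (Spec_parse_fasta_block_py fasta_text out) := by
  unfold Spec_parse_fasta_block_py; infer_instance

-- ===== CLAIM (what is proved, stated in full; the proofs are below) =====
def Claim_equal_parse_fasta_block_py : Prop :=
  ∀ (fasta_text : String), Dom_parse_fasta_block_py fasta_text →
    Pre_parse_fasta_block_py fasta_text →
    Spec_parse_fasta_block_py fasta_text (parse_fasta_block_py fasta_text)

-- ===== LEMMAS AND PROOFS =====

-- header_id of a header line (proof abbreviation for the shared Python expression line[1:].split()[0])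
def pvHid (l : String) : String :=
  (PySem.Str.split₀ (PySem.Str.slice l (some 1) none)).headD ""

-- A's whole loop followed by the final flush, from an arbitrary parser state
def pvARun (lines : List String) (st : PySem.Dict String String × Option String × List String) :
    PySem.Dict String String :=
  let st' := lines.foldl pvAStep st
  pvAFlush st'.1 st'.2.1 st'.2.2

-- invariant while A is inside a record (current_id = some i, i ≠ "")
theorem pvRec (lines : List String) :
    ∀ (seqs : PySem.Dict String String) (i : String) (cseq : List String), i ≠ "" →
    (∀ l ∈ lines, pvNotHeader l = false → pvHid l ≠ "") →
    pvARun lines (seqs, some i, cseq) =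
      pvBLoop (lines.dropWhile pvNotHeader)
        (seqs.insert i (PySem.Str.join ""
          (cseq ++ (lines.takeWhile pvNotHeader).map PySem.Str.strip))) := by
  induction lines with
  | nil =>
    intro seqs i cseq hi _
    simp [pvARun, pvAFlush, pvBLoop, hi]
  | cons l rest ih =>
    intro seqs i cseq hi hall
    cases hnh : pvNotHeader l with
    | true =>
      have hsw : PySem.Chars.startswith l.toList ['>'] = false := by
        simpa [pvNotHeader] using hnh
      have : pvARun (l :: rest) (seqs, some i, cseq)
          = pvARun rest (seqs, some i, cseq ++ [PySem.Str.strip l]) := by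
        simp [pvARun, pvAStep, hsw]
      rw [this, ih seqs i (cseq ++ [PySem.Str.strip l]) hi
        (fun x hx h => hall x (List.mem_cons_of_mem _ hx) h)]
      simp [hnh]
    | false =>
      have hsw : PySem.Chars.startswith l.toList ['>'] = true := by
        simpa [pvNotHeader] using hnh
      have hid : pvHid l ≠ "" := hall l (List.mem_cons_self) hnh
      have : pvARun (l :: rest) (seqs, some i, cseq)
          = pvARun rest (seqs.insert i (PySem.Str.join "" cseq), some (pvHid l), []) := by
        simp [pvARun, pvAStep, pvAFlush, hsw, hi, pvHid]
      rw [this, ih _ (pvHid l) [] hid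
        (fun x hx h => hall x (List.mem_cons_of_mem _ hx) h)]
      conv_rhs => rw [List.dropWhile_cons]
      simp [hnh, pvBLoop, pvHid]

-- invariant before the first header (current_id = None: accumulated lines are discarded)
theorem pvSkip (lines : List String) :
    ∀ (seqs : PySem.Dict String String) (cseq : List String),
    (∀ l ∈ lines, pvNotHeader l = false → pvHid l ≠ "") →
    pvARun lines (seqs, none, cseq) = pvBLoop (lines.dropWhile pvNotHeader) seqs := by
  induction lines with
  | nil => intro seqs cseq _; simp [pvARun, pvAFlush, pvBLoop]
  | cons l rest ih =>
    intro seqs cseq hall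
    cases hnh : pvNotHeader l with
    | true =>
      have hsw : PySem.Chars.startswith l.toList ['>'] = false := by
        simpa [pvNotHeader] using hnh
      have : pvARun (l :: rest) (seqs, none, cseq)
          = pvARun rest (seqs, none, cseq ++ [PySem.Str.strip l]) := by
        simp [pvARun, pvAStep, hsw]
      rw [this, ih seqs _ (fun x hx h => hall x (List.mem_cons_of_mem _ hx) h)]
      simp [hnh]
    | false =>
      have hsw : PySem.Chars.startswith l.toList ['>'] = true := by
        simpa [pvNotHeader] using hnh
      have hid : pvHid l ≠ "" := hall l (List.mem_cons_self) hnh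
      have : pvARun (l :: rest) (seqs, none, cseq)
          = pvARun rest (seqs, some (pvHid l), []) := by
        simp [pvARun, pvAStep, pvAFlush, hsw, pvHid]
      rw [this, pvRec rest seqs (pvHid l) [] hid
        (fun x hx h => hall x (List.mem_cons_of_mem _ hx) h)]
      conv_rhs => rw [List.dropWhile_cons]
      simp [hnh, pvBLoop, pvHid]

-- ===== VERDICT (by name: the statement is the Claim_ definition above) =====
theorem parse_fasta_block_py_spec : Claim_equal_parse_fasta_block_py := by
  intro t _ pre
  unfold Spec_parse_fasta_block_py parse_fasta_block_py parse_fasta_block_py_alt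
  have hall : ∀ l ∈ PySem.Str.splitlines t, pvNotHeader l = false → pvHid l ≠ "" := by
    intro l hl h
    exact pre l hl (by simpa [pvNotHeader] using h)
  have := pvSkip (PySem.Str.splitlines t) PySem.Dict.empty [] hall
  simp only [pvARun] at this
  simp [this]
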